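-- pv_equiv track=rewrite | github.com/RamonvdW/nhb-apps | Overig/e2ehelpers.py | _find_statement
-- ===== SOURCE A (Python) =====
-- def _find_statement(query, start):                  # pragma: no cover
--     best = -1
--     word_len = 0
--     for word in (# 'SELECT', 'DELETE FROM', 'INSERT INTO',
--                  ' WHERE ', ' LEFT OUTER JOIN ',' INNER JOIN ', ' LEFT JOIN ', ' JOIN ',
--                  ' ORDER BY ', ' GROUP BY ', ' ON ', ' FROM ', ' VALUES '):
--         pos = query.find(word, start)
--         if pos >= 0 and (best == -1 or pos < best):
--             best = pos
--             word_len = len(word)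
--     # for
--     return best, word_len
-- ===== SOURCE B (Python) =====
-- _WORDS = (' WHERE ', ' LEFT OUTER JOIN ', ' INNER JOIN ', ' LEFT JOIN ', ' JOIN ',
--           ' ORDER BY ', ' GROUP BY ', ' ON ', ' FROM ', ' VALUES ')
--
--
-- def _find_statement(query, start):
--     # position-major scan: walk the query from `start` and stop at the first
--     # index where one of the keywords begins.
--     for i in range(start, len(query)):
--         for word in _WORDS:
--             if query.startswith(word, i):
--                 return i, len(word)
--     return -1, 0
-- ===== Notes on version B (the rewrite author's own statement) =====
-- stated objective: alternative
-- what changed: Keyword-major scanning (one full query.find per keyword, minimum position wins) is replaced by a single position-major left-to-right walk that stops at the first index where any keyword starts; Pre_ excludes negative start, a corner where str.find's from-the-end clamping and a plain scan-from-start are equally defensible readings.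
-- outside the precondition, e.g. on _find_statement('x FROM y', -7): A returns (1, 6), B returns (-7, 6)
import Mathlib
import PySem

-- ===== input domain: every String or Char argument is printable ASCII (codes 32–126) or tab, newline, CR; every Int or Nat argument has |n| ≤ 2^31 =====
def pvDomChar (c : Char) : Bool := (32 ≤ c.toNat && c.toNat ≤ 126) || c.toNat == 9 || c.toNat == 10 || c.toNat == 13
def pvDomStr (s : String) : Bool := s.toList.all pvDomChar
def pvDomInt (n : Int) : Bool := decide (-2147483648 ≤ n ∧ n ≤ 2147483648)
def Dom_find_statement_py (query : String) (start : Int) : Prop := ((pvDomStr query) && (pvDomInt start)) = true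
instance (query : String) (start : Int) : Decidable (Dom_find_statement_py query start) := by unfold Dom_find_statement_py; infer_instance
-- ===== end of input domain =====

-- B replaces A's keyword-major scanning (a query.find per keyword, minimum position wins)
-- by one position-major walk returning the first index where any keyword starts (alternative, not faster).

-- the literal keyword tuple shared by both sources
def pvWords : List String :=
  [" WHERE ", " LEFT OUTER JOIN ", " INNER JOIN ", " LEFT JOIN ", " JOIN ",
   " ORDER BY ", " GROUP BY ", " ON ", " FROM ", " VALUES "]

-- ===== PORT A =====
def find_statement_py (query : String) (start : Int) : Int × Int :=
  pvWords.foldl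
    (fun (acc : Int × Int) (word : String) =>
      let pos := PySem.Str.findFrom query word start none
      if pos ≥ 0 ∧ (acc.1 = -1 ∨ pos < acc.1) then (pos, PySem.Str.len word) else acc)
    (-1, 0)

-- ===== PORT B =====
-- the `for i in range(start, len(query))` loop as fuel recursion on the remaining
-- indices; `query.startswith(word, i)` is exact by hand: Python clamps a negative
-- start index to max(0, n + i) before comparing the prefix
def pvScanGo (s : List Char) (n : Int) : Nat → Int → Int × Int
  | 0, _ => (-1, 0)
  | fuel + 1, i =>
    let e : Int := if i < 0 then max 0 (n + i) else i
    match pvWords.find? (fun w => PySem.Chars.startswith (s.drop e.toNat) w.toList) with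
    | some w => (i, PySem.Str.len w)
    | none => pvScanGo s n fuel (i + 1)

def find_statement_py_alt (query : String) (start : Int) : Int × Int :=
  let s := query.toList
  let n : Int := (s.length : Int)
  pvScanGo s n (n - start).toNat start

-- ===== PRECONDITION & SPEC =====
-- Pre_ excludes negative start, on which A still returns: str.find interprets a negative
-- start from the end of the string while B's scan counts from its loop index, a corner
-- where either value is defensible and no caller would specify.
def Pre_find_statement_py (query : String) (start : Int) : Prop := 0 ≤ start
instance (query : String) (start : Int) : Decidable (Pre_find_statement_py query start) := by unfold Pre_find_statement_py; infer_instance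

def pvWitness_find_statement_py : String × Int := ("x FROM y", 0)

def Spec_find_statement_py (query : String) (start : Int) (out : Int × Int) : Prop := out = find_statement_py_alt query start
instance (query : String) (start : Int) (out : Int × Int) : Decidable (Spec_find_statement_py query start out) := by unfold Spec_find_statement_py; infer_instance

-- ===== CLAIM (what is proved, stated in full; the proofs are below) =====
def Claim_equal_find_statement_py : Prop := ∀ (query : String) (start : Int), Dom_find_statement_py query start → Pre_find_statement_py query start → Spec_find_statement_py query start (find_statement_py query start)

-- ===== LEMMAS AND PROOFS =====

-- B's loop restated as structural recursion over the suffix (for 0 ≤ i it is pvScanGo)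
def pvScan : List Char → Int → Int × Int
  | [], _ => (-1, 0)
  | c :: cs, i =>
    match pvWords.find? (fun w => PySem.Chars.startswith (c :: cs) w.toList) with
    | some w => (i, PySem.Str.len w)
    | none => pvScan cs (i + 1)

-- for 0 ≤ i the fuel loop is the structural scan over the suffix
theorem pv_go_eq_scan (s : List Char) : ∀ (fuel : Nat) (i : Int), 0 ≤ i →
    fuel = ((s.length : Int) - i).toNat →
    pvScanGo s (s.length : Int) fuel i = pvScan (s.drop i.toNat) i := by
  intro fuel
  induction fuel with
  | zero =>
    intro i hi hf
    have hge : (s.length : Int) ≤ i := by omega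
    have hdrop : s.drop i.toNat = [] := List.drop_eq_nil_of_le (by omega)
    rw [hdrop]
    rfl
  | succ fuel ih =>
    intro i hi hf
    have hlt : i < (s.length : Int) := by omega
    have he : (if i < 0 then max 0 ((s.length : Int) + i) else i) = i := by
      rw [if_neg (by omega)]
    show (let e : Int := if i < 0 then max 0 ((s.length : Int) + i) else i
      match pvWords.find? (fun w => PySem.Chars.startswith (s.drop e.toNat) w.toList) with
      | some w => (i, PySem.Str.len w)
      | none => pvScanGo s (s.length : Int) fuel (i + 1)) = _
    simp only [he]
    have hne : s.drop i.toNat ≠ [] := by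
      intro h
      have := List.drop_eq_nil_iff.mp h
      omega
    match hd : s.drop i.toNat with
    | [] => exact absurd hd hne
    | c :: cs =>
      show (match pvWords.find? (fun w => PySem.Chars.startswith (c :: cs) w.toList) with
        | some w => (i, PySem.Str.len w)
        | none => pvScanGo s (s.length : Int) fuel (i + 1)) = pvScan (c :: cs) i
      have hscan_eq : pvScan (c :: cs) i
          = (match pvWords.find? (fun w => PySem.Chars.startswith (c :: cs) w.toList) with
             | some w => (i, PySem.Str.len w)
             | none => pvScan cs (i + 1)) := rfl
      match hfm : pvWords.find? (fun w => PySem.Chars.startswith (c :: cs) w.toList) with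
      | some w =>
        rw [hscan_eq, hfm]
      | none =>
        rw [hscan_eq, hfm]
        have hcs : cs = s.drop (i + 1).toNat := by
          have : (i + 1).toNat = i.toNat + 1 := by omega
          rw [this, ← List.drop_drop, hd]
          rfl
        rw [ih (i + 1) (by omega) (by omega), ← hcs]

-- shift of a find-result by k (-1 stays -1)
def pvShift (k p : Int) : Int := if p = -1 then -1 else k + p

def pvMap (k : Int) (a : Int × Int) : Int × Int := (pvShift k a.1, a.2)

-- A's fold step, expressed over a suffix t with plain Chars.find
def pvStep (t : List Char) (acc : Int × Int) (word : String) : Int × Int :=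
  if PySem.Chars.find t word.toList ≥ 0 ∧ (acc.1 = -1 ∨ PySem.Chars.find t word.toList < acc.1)
  then (PySem.Chars.find t word.toList, PySem.Str.len word) else acc

theorem pv_go_shift (sub : List Char) : ∀ (t : List Char) (k : Nat),
    PySem.Chars.find.go sub t k = pvShift k (PySem.Chars.find.go sub t 0) := by
  intro t
  induction t with
  | nil =>
    intro k
    simp only [PySem.Chars.find.go, pvShift]
    by_cases h : sub.isEmpty <;> simp [h]
  | cons c t ih =>
    intro k
    show (if sub.isPrefixOf (c :: t) then (k : Int) else PySem.Chars.find.go sub t (k+1))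
        = pvShift k (if sub.isPrefixOf (c :: t) then (0 : Int) else PySem.Chars.find.go sub t 1)
    by_cases h : sub.isPrefixOf (c :: t)
    · simp [h, pvShift]
    · simp only [h, if_false, Bool.false_eq_true]
      rw [ih (k+1), ih 1]
      have hge : -1 ≤ PySem.Chars.find.go sub t 0 := by
        have := PySem.Chars.neg_one_le_find t sub
        simpa [PySem.Chars.find] using this
      unfold pvShift
      split_ifs <;> omega

theorem pv_find_cons (sub : List Char) (c : Char) (t : List Char) :
    PySem.Chars.find (c :: t) sub
      = if sub.isPrefixOf (c :: t) then 0 else pvShift 1 (PySem.Chars.find t sub) := by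
  show PySem.Chars.find.go sub (c :: t) 0 = _
  show (if sub.isPrefixOf (c :: t) then (0 : Int) else PySem.Chars.find.go sub t 1) = _
  by_cases h : sub.isPrefixOf (c :: t)
  · simp [h]
  · simp [h, pv_go_shift sub t 1, PySem.Chars.find]

theorem pv_find_nil (sub : List Char) (h : sub ≠ []) : PySem.Chars.find [] sub = -1 := by
  show PySem.Chars.find.go sub [] 0 = -1
  show (if sub.isEmpty then (0 : Int) else -1) = -1
  simp [List.isEmpty_iff, h]

-- shifting by k ≥ 0 preserves A's update condition
theorem pv_shift_cond (k F b : Int) (hk : 0 ≤ k) (hf : -1 ≤ F) (hb : -1 ≤ b) :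
    (pvShift k F ≥ 0 ∧ (pvShift k b = -1 ∨ pvShift k F < pvShift k b))
      ↔ (F ≥ 0 ∧ (b = -1 ∨ F < b)) := by
  unfold pvShift
  split_ifs <;> omega

-- the accumulator's first component stays ≥ -1
theorem pv_fold_ge (t : List Char) : ∀ (L : List String) (acc : Int × Int), -1 ≤ acc.1 →
    -1 ≤ (L.foldl (pvStep t) acc).1 := by
  intro L
  induction L with
  | nil => intro acc h; simpa using h
  | cons w L ih =>
    intro acc h
    simp only [List.foldl_cons]
    apply ih
    unfold pvStep
    split_ifs with hc
    · exact PySem.Chars.neg_one_le_find t w.toList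
    · exact h

-- folding with every find shifted by k ≥ 0 equals shifting the fold's result
theorem pv_fold_shift (t : List Char) (k : Int) (hk : 0 ≤ k) :
    ∀ (L : List String) (acc : Int × Int), -1 ≤ acc.1 →
    L.foldl (fun (a : Int × Int) (word : String) =>
        if pvShift k (PySem.Chars.find t word.toList) ≥ 0 ∧
            (a.1 = -1 ∨ pvShift k (PySem.Chars.find t word.toList) < a.1)
        then (pvShift k (PySem.Chars.find t word.toList), PySem.Str.len word) else a)
      (pvMap k acc)
      = pvMap k (L.foldl (pvStep t) acc) := by
  intro L
  induction L with
  | nil => intro acc _; rfl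
  | cons w L ih =>
    intro acc hacc
    simp only [List.foldl_cons]
    have hf : -1 ≤ PySem.Chars.find t w.toList := PySem.Chars.neg_one_le_find t w.toList
    have hcond := pv_shift_cond k (PySem.Chars.find t w.toList) acc.1 hk hf hacc
    have hstep : (if pvShift k (PySem.Chars.find t w.toList) ≥ 0 ∧
          ((pvMap k acc).1 = -1 ∨ pvShift k (PySem.Chars.find t w.toList) < (pvMap k acc).1)
        then (pvShift k (PySem.Chars.find t w.toList), PySem.Str.len w) else pvMap k acc)
        = pvMap k (pvStep t acc w) := by
      unfold pvStep
      by_cases hc : PySem.Chars.find t w.toList ≥ 0 ∧ (acc.1 = -1 ∨ PySem.Chars.find t w.toList < acc.1)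
      · rw [if_pos hc]
        rw [if_pos (by simpa only [pvMap] using hcond.mpr hc)]
        rfl
      · rw [if_neg hc]
        rw [if_neg (by simpa only [pvMap] using (fun h => hc (hcond.mp h)))]
    rw [hstep]
    apply ih
    unfold pvStep
    split_ifs with hc
    · exact hf
    · exact hacc

-- once the best position is 0 the fold never changes the accumulator
theorem pv_fold_zero (t : List Char) : ∀ (L : List String) (acc : Int × Int), acc.1 = 0 →
    L.foldl (pvStep t) acc = acc := by
  intro L
  induction L with
  | nil => intro acc _; rfl
  | cons w L ih =>
    intro acc h
    simp only [List.foldl_cons]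
    have : pvStep t acc w = acc := by
      unfold pvStep
      split_ifs with hc
      · exfalso; rcases hc with ⟨h1, h2 | h2⟩ <;> omega
      · rfl
    rw [this]; exact ih acc h

-- if some word matches at position 0, the fold returns (0, length of the first such word)
theorem pv_fold_first (c : Char) (t : List Char) :
    ∀ (L : List String) (w : String) (acc : Int × Int),
    (acc.1 = -1 ∨ 0 < acc.1) →
    L.find? (fun w => PySem.Chars.startswith (c :: t) w.toList) = some w →
    L.foldl (pvStep (c :: t)) acc = (0, PySem.Str.len w) := by
  intro L
  induction L with
  | nil => intro w acc _ h; simp at h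
  | cons w0 L ih =>
    intro w acc hacc hfind
    simp only [List.foldl_cons]
    by_cases hp : PySem.Chars.startswith (c :: t) w0.toList
    · have hw : w = w0 := by
        rw [List.find?_cons_of_pos (p := fun w => PySem.Chars.startswith (c :: t) w.toList)
          (a := w0) (l := L) hp] at hfind
        exact (Option.some_inj.mp hfind).symm
      subst hw
      have hpos : PySem.Chars.find (c :: t) w.toList = 0 := by
        rw [pv_find_cons]
        have : w.toList.isPrefixOf (c :: t) = true := hp
        simp [this]
      have : pvStep (c :: t) acc w = (0, PySem.Str.len w) := by
        unfold pvStep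
        rw [hpos]
        rw [if_pos ⟨le_refl 0, hacc⟩]
      rw [this]
      exact pv_fold_zero _ _ _ rfl
    · have hfind' : L.find? (fun w => PySem.Chars.startswith (c :: t) w.toList) = some w := by
        rwa [List.find?_cons_of_neg (p := fun w => PySem.Chars.startswith (c :: t) w.toList)
          (a := w0) (l := L) (by simpa using hp)] at hfind
      apply ih w _ _ hfind'
      unfold pvStep
      have hne : PySem.Chars.find (c :: t) w0.toList ≠ 0 := by
        rw [pv_find_cons]
        have : w0.toList.isPrefixOf (c :: t) = false := by simpa using hp
        simp only [this, Bool.false_eq_true, if_false]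
        unfold pvShift
        have := PySem.Chars.neg_one_le_find t w0.toList
        split_ifs <;> omega
      have hge := PySem.Chars.neg_one_le_find (c :: t) w0.toList
      split_ifs with hc
      · rcases hc with ⟨h1, _⟩
        show PySem.Chars.find (c :: t) w0.toList = -1 ∨ 0 < PySem.Chars.find (c :: t) w0.toList
        omega
      · exact hacc

-- every keyword is nonempty
theorem pv_words_ne : ∀ w ∈ pvWords, w.toList ≠ [] := by decide

-- the empty-suffix fold is the zero state
theorem pv_fold_nil : pvWords.foldl (pvStep []) (-1, 0) = (-1, 0) := by
  have h : ∀ (L : List String), (∀ w ∈ L, w.toList ≠ []) →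
      ∀ acc : Int × Int, L.foldl (pvStep []) acc = acc := by
    intro L
    induction L with
    | nil => intro _ acc; rfl
    | cons w0 L ih =>
      intro hne acc
      simp only [List.foldl_cons]
      have h0 : pvStep [] acc w0 = acc := by
        unfold pvStep
        rw [pv_find_nil _ (hne w0 (by simp))]
        split_ifs with hc
        · exfalso; rcases hc with ⟨h1, _⟩; omega
        · rfl
      rw [h0]
      exact ih (fun w hw => hne w (by simp [hw])) acc
  exact h pvWords pv_words_ne (-1, 0)

-- the heart: the position-major scan equals the shifted keyword-major fold
theorem pv_scan_eq : ∀ (t : List Char) (i : Int),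
    pvScan t i = pvMap i (pvWords.foldl (pvStep t) (-1, 0)) := by
  intro t
  induction t with
  | nil =>
    intro i
    rw [pv_fold_nil]
    rfl
  | cons c t ih =>
    intro i
    match hfm : pvWords.find? (fun w => PySem.Chars.startswith (c :: t) w.toList) with
    | some w =>
      have : pvScan (c :: t) i = (i, PySem.Str.len w) := by
        show (match pvWords.find? (fun w => PySem.Chars.startswith (c :: t) w.toList) with
              | some w => (i, PySem.Str.len w)
              | none => pvScan t (i + 1)) = (i, PySem.Str.len w)
        rw [hfm]
      rw [this, pv_fold_first c t pvWords w (-1, 0) (by left; rfl) hfm]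
      simp [pvMap, pvShift]
    | none =>
      have hscan : pvScan (c :: t) i = pvScan t (i + 1) := by
        show (match pvWords.find? (fun w => PySem.Chars.startswith (c :: t) w.toList) with
              | some w => (i, PySem.Str.len w)
              | none => pvScan t (i + 1)) = pvScan t (i + 1)
        rw [hfm]
      have hnone := List.find?_eq_none.mp hfm
      -- on every word of the list, find over (c::t) is the shifted find over t
      have hcong : pvWords.foldl (pvStep (c :: t)) (-1, 0)
          = pvWords.foldl (fun (a : Int × Int) (word : String) =>
              if pvShift 1 (PySem.Chars.find t word.toList) ≥ 0 ∧
                  (a.1 = -1 ∨ pvShift 1 (PySem.Chars.find t word.toList) < a.1)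
              then (pvShift 1 (PySem.Chars.find t word.toList), PySem.Str.len word) else a)
            (-1, 0) := by
        apply PySem.List.foldl_congr_mem
        intro acc word hw
        unfold pvStep
        rw [pv_find_cons]
        have : word.toList.isPrefixOf (c :: t) = false := by
          simpa using hnone word hw
        simp [this]
      have hshift := pv_fold_shift t 1 (by omega) pvWords (-1, 0) (by omega)
      have hinit : pvMap 1 ((-1 : Int), (0 : Int)) = (-1, 0) := by simp [pvMap, pvShift]
      rw [hinit] at hshift
      rw [hcong, hshift, hscan, ih (i + 1)]
      have hge := pv_fold_ge t pvWords (-1, 0) (by omega)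
      rcases hres : pvWords.foldl (pvStep t) (-1, 0) with ⟨p, l⟩
      rw [hres] at hge
      simp only at hge
      simp only [pvMap, pvShift, Prod.mk.injEq, and_true]
      split_ifs <;> omega

-- findFrom over the whole query, for 0 ≤ start, is the shifted find over query[start:]
theorem pv_findFrom_eq (query : String) (start : Int) (hstart : 0 ≤ start) (word : String)
    (hne : word.toList ≠ []) :
    PySem.Str.findFrom query word start none
      = pvShift start (PySem.Chars.find (query.toList.drop start.toNat) word.toList) := by
  rw [PySem.Str.findFrom_eq]
  set s := query.toList with hs
  set n : Int := (s.length : Int) with hn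
  have hclamp : (if start < 0 then if start + n < 0 then 0 else start + n else start) = start := by
    split_ifs <;> omega
  show (if n < (if start < 0 then if start + n < 0 then 0 else start + n else start) then (-1 : Int)
      else
        have r := PySem.Chars.find (List.drop (if start < 0 then if start + n < 0 then 0 else start + n else start).toNat (List.take n.toNat s)) word.toList
        if r = -1 then -1 else (if start < 0 then if start + n < 0 then 0 else start + n else start) + r) = _
  rw [hclamp]
  have htake : List.take n.toNat s = s := by
    rw [hn]; simp
  rw [htake]
  by_cases hlt : n < start
  · rw [if_pos hlt]
    have hdrop : List.drop start.toNat s = [] := by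
      apply List.drop_eq_nil_of_le
      omega
    rw [hdrop, pv_find_nil _ hne]
    simp [pvShift]
  · rw [if_neg hlt]
    unfold pvShift
    rfl

-- ===== VERDICT (by name: the statement is the Claim_ definition above) =====
theorem find_statement_py_spec : Claim_equal_find_statement_py := by
  intro query start _ hpre
  unfold Spec_find_statement_py find_statement_py find_statement_py_alt
  set s := query.toList with hs
  have hcong : pvWords.foldl
      (fun (acc : Int × Int) (word : String) =>
        let pos := PySem.Str.findFrom query word start none
        if pos ≥ 0 ∧ (acc.1 = -1 ∨ pos < acc.1) then (pos, PySem.Str.len word) else acc)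
      (-1, 0)
      = pvWords.foldl (fun (a : Int × Int) (word : String) =>
          let pos := pvShift start (PySem.Chars.find (s.drop start.toNat) word.toList)
          if pos ≥ 0 ∧ (a.1 = -1 ∨ pos < a.1) then (pos, PySem.Str.len word) else a)
        (-1, 0) := by
    apply PySem.List.foldl_congr_mem
    intro acc word hw
    rw [pv_findFrom_eq query start hpre word (pv_words_ne word hw)]
  rw [hcong]
  have hshift := pv_fold_shift (s.drop start.toNat) start hpre pvWords (-1, 0) (by omega)
  have hinit : pvMap start ((-1 : Int), (0 : Int)) = (-1, 0) := by simp [pvMap, pvShift]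
  rw [hinit] at hshift
  rw [hshift, ← pv_scan_eq (s.drop start.toNat) start]
  exact (pv_go_eq_scan s _ start hpre rfl).symm
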